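-- pv_equiv track=rewrite | github.com/Tay-Son/GH_CT | Algorithm/PRG-Completed/PRG 017683.py | music_parser
-- ===== SOURCE A (Python) =====
-- def music_parser(music_):
--     dct_note = {'C': 'a',
--                 'C#': 'b',
--                 'D': 'c',
--                 'D#': 'd',
--                 'E': 'e',
--                 'F': 'f',
--                 'F#': 'g',
--                 'G': 'h',
--                 'G#': 'i',
--                 'A': 'j',
--                 'A#': 'k',
--                 'B': 'l'}
--     str_result = ''
--     curr_note = music_[0]
--     if len(music_) > 1:
--         for each_chr in music_[1:]:
--             if each_chr == '#':
--                 curr_note += each_chr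
--             else:
--                 if curr_note in dct_note:
--                     str_result += dct_note[curr_note]
--                 curr_note = each_chr
--     if curr_note in dct_note:
--         str_result += dct_note[curr_note]
--     return str_result
-- ===== SOURCE B (Python) =====
-- def music_parser(music_):
--     dct_note = {'C': 'a',
--                 'C#': 'b',
--                 'D': 'c',
--                 'D#': 'd',
--                 'E': 'e',
--                 'F': 'f',
--                 'F#': 'g',
--                 'G': 'h',
--                 'G#': 'i',
--                 'A': 'j',
--                 'A#': 'k',
--                 'B': 'l'}
--     # pass 1: tokenize into units = one char + all immediately following '#'s
--     tokens = []
--     i = 0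
--     n = len(music_)
--     while i < n:
--         j = i + 1
--         while j < n and music_[j] == '#':
--             j += 1
--         tokens.append(music_[i:j])
--         i = j
--     # pass 2: map tokens through the table, skipping unknown tokens
--     return ''.join(dct_note.get(t, '') for t in tokens)
-- ===== Notes on version B (the rewrite author's own statement) =====
-- stated objective: alternative
-- what changed: A's single incremental accumulator loop (carrying curr_note and flushing it on each non-'#') is replaced by a two-pass tokenize-then-map decomposition: first split the string into units of one character plus its trailing '#'s, then join the table lookups of the tokens.
-- outside the precondition, e.g. on music_parser(''): A raises IndexError, B returns ''
-- crash fix: On the empty string A raises IndexError (music_[0]); B's tokenizer produces no tokens and B returns ''. — e.g. on music_parser(""): A raises IndexError, B returns ""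
import Mathlib
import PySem

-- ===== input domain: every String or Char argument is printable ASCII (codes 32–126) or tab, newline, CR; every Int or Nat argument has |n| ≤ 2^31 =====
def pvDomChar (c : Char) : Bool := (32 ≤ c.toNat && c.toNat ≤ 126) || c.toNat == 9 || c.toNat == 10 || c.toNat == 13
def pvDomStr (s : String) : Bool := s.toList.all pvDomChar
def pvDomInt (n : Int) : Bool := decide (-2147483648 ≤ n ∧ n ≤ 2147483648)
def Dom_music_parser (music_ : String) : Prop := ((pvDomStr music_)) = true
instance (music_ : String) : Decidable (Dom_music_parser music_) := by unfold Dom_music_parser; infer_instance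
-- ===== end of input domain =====

-- B replaces A's incremental accumulator loop by a tokenize-then-map two-pass
-- decomposition (objective: alternative); on "" A raises IndexError while B returns "".

-- shared constant: the note table (a plain data literal used by both ports)
def pvDctNote : PySem.Dict String String :=
  PySem.Dict.ofList [("C", "a"), ("C#", "b"), ("D", "c"), ("D#", "d"),
                     ("E", "e"), ("F", "f"), ("F#", "g"), ("G", "h"),
                     ("G#", "i"), ("A", "j"), ("A#", "k"), ("B", "l")]

-- ===== PORT A =====
-- the body of A's for-loop plus the final flush, over the remaining characters;
-- state = (curr_note as a char list, str_result)
def pvALoop (cs : List Char) (curr : List Char) (res : String) : String :=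
  match cs with
  | [] =>
      match PySem.Dict.get? pvDctNote (String.ofList curr) with
      | some v => res ++ v
      | none => res
  | c :: rest =>
      if c == '#' then pvALoop rest (curr ++ [c]) res
      else
        match PySem.Dict.get? pvDctNote (String.ofList curr) with
        | some v => pvALoop rest [c] (res ++ v)
        | none => pvALoop rest [c] res

def music_parser (music_ : String) : String :=
  match music_.toList with
  | [] => ""   -- Python A raises IndexError on music_[0] here; excluded by Pre_
  | c :: rest => pvALoop rest [c] ""

-- ===== PORT B =====
-- pass 1 of Source B: split into units of one char plus its trailing '#'s
def pvTokenize : List Char → List (List Char)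
  | [] => []
  | c :: rest =>
      (c :: rest.takeWhile (· == '#')) :: pvTokenize (rest.dropWhile (· == '#'))
termination_by cs => cs.length
decreasing_by
  simpa using Nat.lt_succ_of_le (List.length_dropWhile_le _ _)

-- pass 2 of Source B: ''.join(dct_note.get(t, '') for t in tokens)
def pvJoinMap : List (List Char) → String
  | [] => ""
  | t :: ts => PySem.Dict.getD pvDctNote (String.ofList t) "" ++ pvJoinMap ts

def music_parser_alt (music_ : String) : String :=
  pvJoinMap (pvTokenize music_.toList)

-- ===== PRECONDITION & SPEC =====
-- A evaluates music_[0], so the empty string raises IndexError; Pre_ excludes exactly it.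
def Pre_music_parser (music_ : String) : Prop := music_ ≠ ""
instance (music_ : String) : Decidable (Pre_music_parser music_) := by
  unfold Pre_music_parser; infer_instance
def pvWitness_music_parser : String := "C#D"

-- On the empty string A raises IndexError (music_[0]); B's tokenizer yields no tokens and B returns ''.
def Raises_music_parser (music_ : String) : Prop := music_ = ""
instance (music_ : String) : Decidable (Raises_music_parser music_) := by
  unfold Raises_music_parser; infer_instance
def pvRaiseWitness_music_parser : String := ""
def pvRaiseWitnessOut_music_parser : String := ""

def Spec_music_parser (music_ : String) (out : String) : Prop := out = music_parser_alt music_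
instance (music_ : String) (out : String) : Decidable (Spec_music_parser music_ out) := by
  unfold Spec_music_parser; infer_instance

-- ===== CLAIM (what is proved, stated in full; the proofs are below) =====
def Claim_equal_music_parser : Prop := ∀ (music_ : String), Dom_music_parser music_ → Pre_music_parser music_ → Spec_music_parser music_ (music_parser music_)
def Claim_raises_music_parser : Prop := (∀ (music_ : String), Dom_music_parser music_ → Raises_music_parser music_ → ¬ Pre_music_parser music_) ∧ (Dom_music_parser (pvRaiseWitness_music_parser) ∧ Raises_music_parser (pvRaiseWitness_music_parser) ∧ music_parser_alt (pvRaiseWitness_music_parser) = pvRaiseWitnessOut_music_parser)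

-- ===== LEMMAS AND PROOFS =====

-- the token list produced once cs is consumed, given the pending unit `pre`
def pvGlue (pre : List Char) (cs : List Char) : List (List Char) :=
  (pre ++ cs.takeWhile (· == '#')) :: pvTokenize (cs.dropWhile (· == '#'))

lemma pvALoop_eq (cs : List Char) : ∀ (pre : List Char) (res : String),
    pvALoop cs pre res = res ++ pvJoinMap (pvGlue pre cs) := by
  induction cs with
  | nil =>
      intro pre res
      simp only [pvALoop, pvGlue, pvJoinMap, PySem.Dict.getD,
        List.takeWhile_nil, List.dropWhile_nil, List.append_nil, pvTokenize]
      cases PySem.Dict.get? pvDctNote (String.ofList pre) <;> simp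
  | cons c rest ih =>
      intro pre res
      by_cases hc : c = '#'
      · subst hc
        simp only [pvALoop, beq_self_eq_true, ih, pvGlue,
          List.takeWhile_cons, List.dropWhile_cons, List.append_assoc]
        simp
      · have hb : (c == '#') = false := by simp [hc]
        have hglue : pvGlue pre (c :: rest) = pre :: pvGlue [c] rest := by
          simp [pvGlue, pvTokenize, hb]
        rw [show pvALoop (c :: rest) pre res
              = (match PySem.Dict.get? pvDctNote (String.ofList pre) with
                 | some v => pvALoop rest [c] (res ++ v)
                 | none => pvALoop rest [c] res) from by simp [pvALoop, hb]]
        cases h : PySem.Dict.get? pvDctNote (String.ofList pre) <;>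
          simp [ih, hglue, pvJoinMap, PySem.Dict.getD, h, String.append_assoc]

-- ===== VERDICT (by name: the statement is the Claim_ definition above) =====
theorem music_parser_spec : Claim_equal_music_parser := by
  intro music_ _ hpre
  unfold Spec_music_parser music_parser music_parser_alt
  cases hcs : music_.toList with
  | nil =>
      exact absurd (by simpa using congrArg String.ofList hcs) hpre
  | cons c rest =>
      show pvALoop rest [c] "" = pvJoinMap (pvTokenize (c :: rest))
      rw [pvALoop_eq]
      simp [pvGlue, pvTokenize]

@[simp] theorem music_parser_raises : Claim_raises_music_parser := by
  unfold Claim_raises_music_parser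
  exact ⟨fun m _ hr hp => hp hr,
    by decide, by decide,
    by simp [music_parser_alt, pvRaiseWitness_music_parser,
             pvRaiseWitnessOut_music_parser, pvTokenize, pvJoinMap]⟩
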